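-- pv_equiv track=rewrite | github.com/pc5401/my_BOJ | 백준/Silver/1639. 행운의 티켓/행운의 티켓.py | solve
-- ===== SOURCE A (Python) =====
-- def solve(N: int, S: str) -> int:
--     rtn = 0
--
--     for n in range(N):
--         left, right = 0, 0
--         i, j = n, n + 1
--         while i >= 0 and j < N:
--             left += int(S[i])
--             right += int(S[j])
--             if left == right:
--                 rtn = max(rtn, j - i + 1)
--             i -= 1
--             j += 1
--
--     return rtn
-- ===== SOURCE B (Python) =====
-- def solve(N: int, S: str) -> int:
--     # prefix-sum table, then scan all even-length (start, end) spans
--     if N < 2: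
--         return 0
--     P = [0]
--     for ch in S[:N]:
--         P.append(P[-1] + int(ch))
--     best = 0
--     for i in range(N):
--         for j in range(i + 1, N, 2):
--             if 2 * P[(i + j + 1) // 2] == P[i] + P[j + 1]:
--                 best = max(best, j - i + 1)
--     return best
-- ===== Notes on version B (the rewrite author's own statement) =====
-- stated objective: alternative
-- what changed: A expands incrementally around each center with a while loop accumulating left/right digit sums; B precomputes a prefix-sum table of the digits once and then checks every even-length (start, end) span with a closed-form table lookup 2*P[mid]==P[i]+P[j+1].
import Mathlib
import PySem

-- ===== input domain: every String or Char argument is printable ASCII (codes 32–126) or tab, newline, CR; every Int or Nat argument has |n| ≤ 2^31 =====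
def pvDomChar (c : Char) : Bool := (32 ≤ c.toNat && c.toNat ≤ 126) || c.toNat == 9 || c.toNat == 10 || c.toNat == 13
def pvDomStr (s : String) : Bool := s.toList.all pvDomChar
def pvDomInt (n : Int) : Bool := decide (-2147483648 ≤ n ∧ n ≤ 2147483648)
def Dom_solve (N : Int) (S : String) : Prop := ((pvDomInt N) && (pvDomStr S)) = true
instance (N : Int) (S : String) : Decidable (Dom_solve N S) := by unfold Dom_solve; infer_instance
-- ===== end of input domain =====

-- B replaces A's per-center while-loop expansion by a prefix-sum table scanned over all even-length (start, end) spans; same O(N^2) cost, different shape.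

-- ===== PORT A =====
-- int(c) for a single character; the .getD fallbacks are only reached outside Pre_solve
def pvDigit (c : Char) : Int := (PySem.Int.ofChars? [c]).getD 0

def solveLoop (cs : List Char) (N left right i j rtn : Int) : Int :=
  if h : 0 ≤ i ∧ j < N then
    let left' := left + pvDigit ((PySem.List.pyGet? cs i).getD ' ')
    let right' := right + pvDigit ((PySem.List.pyGet? cs j).getD ' ')
    solveLoop cs N left' right' (i - 1) (j + 1)
      (if left' = right' then max rtn (j - i + 1) else rtn)
  else rtn
termination_by (N - j).toNat
decreasing_by omega

def solve (N : Int) (S : String) : Int :=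
  (PySem.List.pyRange 0 N 1).foldl (fun rtn n => solveLoop S.toList N 0 0 n (n + 1) rtn) 0

-- ===== PORT B =====
def solve_alt (N : Int) (S : String) : Int :=
  if N < 2 then 0
  else
    let P := (PySem.List.slice S.toList none (some N)).foldl
      (fun P ch => P ++ [(PySem.List.pyGet? P (-1)).getD 0 + pvDigit ch]) [0]
    (PySem.List.pyRange 0 N 1).foldl (fun best i =>
      (PySem.List.pyRange (i + 1) N 2).foldl (fun best j =>
        if 2 * PySem.List.pyGetD P (PySem.Int.floordiv (i + j + 1) 2) 0
            = PySem.List.pyGetD P i 0 + PySem.List.pyGetD P (j + 1) 0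
        then max best (j - i + 1) else best) best) 0

-- ===== PRECONDITION & SPEC =====
-- Python A raises (IndexError, or ValueError from int()) exactly when N ≥ 2 and S is shorter than N or has a non-digit among its first N characters; Pre_ excludes exactly those inputs.
def Pre_solve (N : Int) (S : String) : Prop :=
  2 ≤ N → N ≤ S.toList.length ∧ (S.toList.take N.toNat).all PySem.Chars.isdigit = true
instance (N : Int) (S : String) : Decidable (Pre_solve N S) := by unfold Pre_solve; infer_instance

def pvWitness_solve : Int × String := (6, "123312")

def Spec_solve (N : Int) (S : String) (out : Int) : Prop := out = solve_alt N S
instance (N : Int) (S : String) (out : Int) : Decidable (Spec_solve N S out) := by unfold Spec_solve; infer_instance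

-- ===== CLAIM (what is proved, stated in full; the proofs are below) =====
def Claim_equal_solve : Prop := ∀ (N : Int) (S : String), Dom_solve N S → Pre_solve N S → Spec_solve N S (solve N S)

-- ===== LEMMAS AND PROOFS =====

-- int(S[t]) as A reads it, as a function of the index
def dAt (cs : List Char) (t : Int) : Int := pvDigit ((PySem.List.pyGet? cs t).getD ' ')

-- the list of lengths A's inner while-loop records, from a given loop state
def candA (cs : List Char) (N l r i j : Int) : List Int :=
  if _h : 0 ≤ i ∧ j < N then
    (if l + dAt cs i = r + dAt cs j then [j - i + 1] else []) ++
      candA cs N (l + dAt cs i) (r + dAt cs j) (i - 1) (j + 1)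
  else []
termination_by (N - j).toNat
decreasing_by omega

-- sum of dAt at i, i-1, …, i-k  /  at j, j+1, …, j+k
def SD (cs : List Char) (i : Int) : Nat → Int
  | 0 => dAt cs i
  | k+1 => dAt cs i + SD cs (i - 1) k
def SU (cs : List Char) (j : Int) : Nat → Int
  | 0 => dAt cs j
  | k+1 => dAt cs j + SU cs (j + 1) k

-- digit prefix sums
def Pf (l : List Char) (m : Nat) : Int := ((l.take m).map pvDigit).sum

-- the prefix sums B's loop appends after the initial 0
def scanP (a : Int) : List Char → List Int
  | [] => []
  | c :: l => (a + pvDigit c) :: scanP (a + pvDigit c) l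

theorem Pf_zero (l : List Char) : Pf l 0 = 0 := by simp [Pf]

theorem Pf_cons (c : Char) (l : List Char) (m : Nat) : Pf (c :: l) (m + 1) = pvDigit c + Pf l m := by
  simp [Pf, List.take_succ_cons]

theorem Pf_succ (l : List Char) (m : Nat) (h : m < l.length) : Pf l (m + 1) = Pf l m + pvDigit l[m] := by
  have hm : m < (l.map pvDigit).length := by simpa using h
  simp only [Pf, List.map_take]
  rw [List.sum_take_succ _ _ hm]
  simp

theorem Pf_take (l : List Char) (n m : Nat) (h : m ≤ n) : Pf (l.take n) m = Pf l m := by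
  simp [Pf, List.take_take, Nat.min_eq_left h]

theorem foldl_foldl_max (L : List Int) (C : Int → List Int) (a : Int) :
    L.foldl (fun r n => (C n).foldl max r) a = (L.flatMap C).foldl max a := by
  induction L generalizing a with
  | nil => rfl
  | cons x xs ih => simp [List.flatMap_cons, List.foldl_append, ih]

theorem foldl_if_max (L : List Int) (p : Int → Prop) [DecidablePred p] (v : Int → Int) (a : Int) :
    L.foldl (fun b j => if p j then max b (v j) else b) a
      = (L.filterMap (fun j => if p j then some (v j) else none)).foldl max a := by
  induction L generalizing a with
  | nil => rfl
  | cons x xs ih => by_cases h : p x <;> simp [h, ih]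

theorem foldl_max_congr_mem (L1 L2 : List Int) (a : Int) (h : ∀ x, x ∈ L1 ↔ x ∈ L2) :
    L1.foldl max a = L2.foldl max a := by
  apply le_antisymm
  · rcases PySem.List.foldl_max_mem L1 a with h1 | h1
    · rw [h1]; exact (PySem.List.le_foldl_max L2 a).1
    · exact (PySem.List.le_foldl_max L2 a).2 _ ((h _).1 h1)
  · rcases PySem.List.foldl_max_mem L2 a with h1 | h1
    · rw [h1]; exact (PySem.List.le_foldl_max L1 a).1
    · exact (PySem.List.le_foldl_max L1 a).2 _ ((h _).2 h1)

theorem buildP (l : List Char) :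
    ∀ (acc : List Int) (a : Int), acc.getLast? = some a →
    l.foldl (fun P ch => P ++ [(PySem.List.pyGet? P (-1)).getD 0 + pvDigit ch]) acc
      = acc ++ scanP a l := by
  induction l with
  | nil => intro acc a _; simp [scanP]
  | cons c l ih =>
      intro acc a h
      rw [List.foldl_cons]
      rw [show (PySem.List.pyGet? acc (-1)).getD 0 = a by simp [PySem.List.pyGet?_neg_one, h]]
      rw [ih (acc ++ [a + pvDigit c]) (a + pvDigit c) (by simp)]
      simp [scanP]

theorem scanP_get (l : List Char) : ∀ (a : Int) (k : Nat), k < l.length →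
    (scanP a l)[k]? = some (a + Pf l (k + 1)) := by
  induction l with
  | nil => intro a k h; simp at h
  | cons c l ih =>
      intro a k h
      cases k with
      | zero => simp [scanP, Pf_cons, Pf_zero]
      | succ k =>
          simp only [scanP, List.getElem?_cons_succ]
          rw [ih _ k (by simpa using h), Pf_cons]
          ring_nf

theorem P_get (l : List Char) (m : Nat) (h : m ≤ l.length) :
    PySem.List.pyGetD ((0 : Int) :: scanP 0 l) (m : Int) 0 = Pf l m := by
  rw [PySem.List.pyGetD_natCast]
  cases m with
  | zero => simp [Pf_zero]
  | succ k =>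
      simp only [List.getD, List.getElem?_cons_succ]
      rw [scanP_get l 0 k (by omega)]
      simp

theorem solveLoop_eq_candA (cs : List Char) (N l r i j rtn : Int) :
    solveLoop cs N l r i j rtn = (candA cs N l r i j).foldl max rtn := by
  fun_induction solveLoop cs N l r i j rtn with
  | case1 l r i j rtn h lv rv ih =>
      rw [candA]
      simp only [dif_pos h, dAt]
      show solveLoop cs N lv rv (i - 1) (j + 1) (if lv = rv then max rtn (j - i + 1) else rtn)
        = List.foldl max rtn ((if lv = rv then [j - i + 1] else []) ++ candA cs N lv rv (i - 1) (j + 1))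
      simp only [dite_eq_ite] at ih
      rw [ih]
      by_cases hc : lv = rv <;> simp [hc]
  | case2 l r i j rtn h =>
      rw [candA]
      simp [h]

theorem mem_candA (cs : List Char) (N : Int) (l r i j x : Int) :
    x ∈ candA cs N l r i j ↔
      ∃ k : Nat, (k : Int) ≤ i ∧ j + k < N ∧ l + SD cs i k = r + SU cs j k ∧ x = j - i + 2 * k + 1 := by
  fun_induction candA cs N l r i j with
  | case1 l r i j h ih =>
      rw [List.mem_append]
      constructor
      · rintro (hx | hx)
        · refine ⟨0, by omega, by omega, ?_, ?_⟩
          · simp only [SD, SU]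
            by_cases hc : l + dAt cs i = r + dAt cs j
            · exact hc
            · simp [hc] at hx
          · by_cases hc : l + dAt cs i = r + dAt cs j
            · simp [hc] at hx; omega
            · simp [hc] at hx
        · obtain ⟨k, h1, h2, h3, h4⟩ := ih.1 hx
          refine ⟨k + 1, by push_cast; omega, by push_cast; omega, ?_, by push_cast; omega⟩
          simp only [SD, SU]
          omega
      · rintro ⟨k, h1, h2, h3, h4⟩
        cases k with
        | zero =>
            left
            simp only [SD, SU, Nat.cast_zero] at h3 h4
            simp [h3, show x = j - i + 1 by omega]
        | succ k =>
            right
            apply ih.2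
            refine ⟨k, by push_cast at h1 ⊢; omega, by push_cast at h2 ⊢; omega, ?_, by push_cast at h4 ⊢; omega⟩
            simp only [SD, SU] at h3
            omega
  | case2 l r i j h =>
      simp only [List.not_mem_nil, false_iff]
      rintro ⟨k, hk1, hk2, -, -⟩
      exact h ⟨by omega, by omega⟩

theorem dAt_nat (cs : List Char) (t : Nat) (h : t < cs.length) :
    dAt cs (t : Int) = pvDigit cs[t] := by
  simp [dAt, PySem.List.pyGet?_natCast, List.getElem?_eq_getElem h]

theorem SD_eq (cs : List Char) : ∀ (k i : Nat), k ≤ i → i < cs.length →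
    SD cs (i : Int) k = Pf cs (i + 1) - Pf cs (i - k) := by
  intro k
  induction k with
  | zero =>
      intro i _ hi
      simp only [SD, dAt_nat cs i hi, Nat.sub_zero, Pf_succ cs i hi]
      ring
  | succ k ih =>
      intro i hk hi
      obtain ⟨i', rfl⟩ : ∃ i', i = i' + 1 := ⟨i - 1, by omega⟩
      have hc1 : ((i' + 1 : Nat) : Int) - 1 = (i' : Int) := by push_cast; ring
      simp only [SD, hc1, ih i' (by omega) (by omega), dAt_nat cs (i'+1) hi,
        Pf_succ cs (i'+1) hi]
      have hc2 : i' + 1 - (k + 1) = i' - k := by omega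
      rw [hc2]
      ring

theorem SU_eq (cs : List Char) : ∀ (k j : Nat), j + k < cs.length →
    SU cs (j : Int) k = Pf cs (j + k + 1) - Pf cs j := by
  intro k
  induction k with
  | zero =>
      intro j hj
      simp only [SU, dAt_nat cs j (by omega), Nat.add_zero, Pf_succ cs j (by omega)]
      ring
  | succ k ih =>
      intro j hj
      have hcast : (j : Int) + 1 = ((j + 1 : Nat) : Int) := by push_cast; ring
      simp only [SU, hcast, ih (j+1) (by omega), dAt_nat cs j (by omega),
        Pf_succ cs j (by omega)]
      have hc : j + 1 + k + 1 = j + (k + 1) + 1 := by omega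
      rw [hc]
      ring

theorem floordiv_two_cast (m : Nat) : PySem.Int.floordiv ((2 * m : Nat) : Int) 2 = (m : Int) := by
  simp

-- ===== VERDICT (by name: the statement is the Claim_ definition above) =====
theorem solve_spec : Claim_equal_solve := by
  intro N S _ hPre
  unfold Spec_solve
  by_cases h2 : 2 ≤ N
  · obtain ⟨hlen, -⟩ := hPre h2
    have hA : solve N S = ((PySem.List.pyRange 0 N 1).flatMap
        (fun n => candA S.toList N 0 0 n (n + 1))).foldl max 0 := by
      unfold solve
      simp only [solveLoop_eq_candA]
      exact foldl_foldl_max _ (fun n => candA S.toList N 0 0 n (n + 1)) 0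
    have hNlt : ¬ N < 2 := by omega
    set cs := S.toList with hcs
    set l := cs.take N.toNat with hl
    have hslice : PySem.List.slice cs none (some N) = l := PySem.List.slice_to _ (by omega)
    have hP : l.foldl (fun P ch => P ++ [(PySem.List.pyGet? P (-1)).getD 0 + pvDigit ch]) [0]
        = (0 : Int) :: scanP 0 l := by
      exact buildP l [0] 0 (by simp)
    have hinner : ∀ (a i : Int),
        (PySem.List.pyRange (i + 1) N 2).foldl (fun best j =>
          if 2 * PySem.List.pyGetD ((0:Int) :: scanP 0 l) (PySem.Int.floordiv (i + j + 1) 2) 0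
              = PySem.List.pyGetD ((0:Int) :: scanP 0 l) i 0 + PySem.List.pyGetD ((0:Int) :: scanP 0 l) (j + 1) 0
          then max best (j - i + 1) else best) a
        = ((PySem.List.pyRange (i + 1) N 2).filterMap (fun j =>
            if 2 * PySem.List.pyGetD ((0:Int) :: scanP 0 l) (PySem.Int.floordiv (i + j + 1) 2) 0
              = PySem.List.pyGetD ((0:Int) :: scanP 0 l) i 0 + PySem.List.pyGetD ((0:Int) :: scanP 0 l) (j + 1) 0
            then some (j - i + 1) else none)).foldl max a :=
      fun a i => foldl_if_max _ _ _ a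
    rw [hA]
    unfold solve_alt
    rw [if_neg hNlt]
    simp only [← hcs]
    simp only [hslice, hP, hinner]
    rw [foldl_foldl_max]
    apply foldl_max_congr_mem
    intro x
    have hlenl : l.length = N.toNat := by
      rw [hl, List.length_take]; omega
    simp only [List.mem_flatMap, mem_candA, List.mem_filterMap, PySem.List.mem_pyRange_one,
      PySem.List.mem_pyRange_iff_of_pos (show (0:Int) < 2 by norm_num)]
    constructor
    · rintro ⟨n, ⟨hn0, hnN⟩, k, hk1, hk2, hk3, hk4⟩
      lift n to ℕ using hn0 with nn
      have hk1' : k ≤ nn := by exact_mod_cast hk1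
      have hnlen : nn < cs.length := by omega
      have hklen : nn + 1 + k < cs.length := by omega
      rw [SD_eq cs k nn hk1' hnlen,
        show ((nn : Int) + 1) = ((nn + 1 : Nat) : Int) by push_cast; ring,
        SU_eq cs k (nn + 1) hklen,
        show nn + 1 + k + 1 = nn + k + 2 by omega] at hk3
      refine ⟨((nn - k : Nat) : Int), ⟨by omega, by omega⟩,
        ((nn + k + 1 : Nat) : Int), ⟨by push_cast; omega, by push_cast; omega,
          ⟨(k : Int), by push_cast; omega⟩⟩, ?_⟩
      have hcond : 2 * PySem.List.pyGetD ((0:Int) :: scanP 0 l)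
            (PySem.Int.floordiv (((nn - k : Nat) : Int) + ((nn + k + 1 : Nat) : Int) + 1) 2) 0
          = PySem.List.pyGetD ((0:Int) :: scanP 0 l) ((nn - k : Nat) : Int) 0
            + PySem.List.pyGetD ((0:Int) :: scanP 0 l) (((nn + k + 1 : Nat) : Int) + 1) 0 := by
        rw [show (((nn - k : Nat) : Int) + ((nn + k + 1 : Nat) : Int) + 1) = ((2 * (nn + 1) : Nat) : Int) by push_cast; omega,
          floordiv_two_cast]
        rw [show (((nn + k + 1 : Nat) : Int) + 1) = ((nn + k + 2 : Nat) : Int) by push_cast; omega]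
        rw [P_get l (nn + 1) (by omega), P_get l (nn - k) (by omega), P_get l (nn + k + 2) (by omega)]
        rw [Pf_take cs _ _ (by omega), Pf_take cs _ _ (by omega), Pf_take cs _ _ (by omega)]
        omega
      rw [if_pos hcond]
      simp only [Option.some.injEq]
      omega
    · rintro ⟨i, ⟨hi0, hiN⟩, j, ⟨hj1, hjN, hdvd⟩, hopt⟩
      split_ifs at hopt with hcond
      · simp only [Option.some.injEq] at hopt
        lift i to ℕ using hi0 with ii
        obtain ⟨t, ht⟩ := hdvd
        have ht0 : 0 ≤ t := by omega
        lift t to ℕ using ht0 with kk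
        have hj : j = ((ii + 1 + 2 * kk : Nat) : Int) := by push_cast; omega
        subst hj
        rw [show ((ii : Int) + ((ii + 1 + 2 * kk : Nat) : Int) + 1) = ((2 * (ii + kk + 1) : Nat) : Int) by push_cast; omega,
          floordiv_two_cast,
          show (((ii + 1 + 2 * kk : Nat) : Int) + 1) = ((ii + 2 * kk + 2 : Nat) : Int) by push_cast; omega] at hcond
        rw [P_get l (ii + kk + 1) (by omega), P_get l ii (by omega),
          P_get l (ii + 2 * kk + 2) (by omega)] at hcond
        rw [Pf_take cs _ _ (by omega), Pf_take cs _ _ (by omega),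
          Pf_take cs _ _ (by omega)] at hcond
        refine ⟨((ii + kk : Nat) : Int), ⟨by push_cast; omega, by push_cast; omega⟩, kk,
          by push_cast; omega, by push_cast; omega, ?_, by push_cast; omega⟩
        rw [SD_eq cs kk (ii + kk) (by omega) (by omega),
          show (((ii + kk : Nat) : Int) + 1) = ((ii + kk + 1 : Nat) : Int) by push_cast; ring,
          SU_eq cs kk (ii + kk + 1) (by omega),
          show ii + kk - kk = ii by omega,
          show ii + kk + 1 + kk + 1 = ii + 2 * kk + 2 by omega]
        omega
  · have hlt : N < 2 := by omega
    have hBalt : solve_alt N S = 0 := by unfold solve_alt; rw [if_pos hlt]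
    rw [hBalt]
    unfold solve
    by_cases h0 : N ≤ 0
    · rw [PySem.List.pyRange_one_eq_nil (by omega)]
      rfl
    · have hN1 : N = 1 := by omega
      subst hN1
      rw [show PySem.List.pyRange 0 1 1 = [0] from by decide]
      simp only [List.foldl_cons, List.foldl_nil]
      rw [solveLoop]
      norm_num
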